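-- pv_equiv track=rewrite | github.com/AESIRLab/DrugRepurposing-framework | app/drugapp/Monarch_original.py | keep_node_type
-- ===== SOURCE A (Python) =====
-- def keep_node_type(edges, seed, nodeType='ortho'):
--     """
--     This function keeps specific node types for objects in edges.
--
--     :param edges: edges set
--     :param seed: the query nodes list
--     :param nodeType: Introduce node type to keep (string): 'ortho' for orthologs or 'pheno' \
--     for phenotypes/diseases, default is 'ortho'
--     :return: nodes set
--     """
--
--     propertyList = ['RO:HOM0000017', 'RO:HOM0000020']
--     if nodeType == 'pheno':
--         propertyList = ['RO:0002200', 'RO:0002607', 'RO:0002326', 'GENO:0000840']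
--
--     keep = set()
--     for (sub, rel, obj, ref) in edges:
--         if rel == None:
--             continue
--         if rel in propertyList:
--             if sub not in seed:
--                 keep.add(sub)
--             if obj not in seed:
--                 keep.add(obj)
--
--     return keep
-- ===== SOURCE B (Python) =====
-- def keep_node_type(edges, seed, nodeType='ortho'):
--     """Divide-and-conquer: recursively split the edge list, build each half's
--     contribution as a set, and merge halves with set union; a single edge
--     contributes {sub, obj} - seedset when its relation matches."""
--     propertyList = ['RO:HOM0000017', 'RO:HOM0000020']
--     if nodeType == 'pheno':
--         propertyList = ['RO:0002200', 'RO:0002607', 'RO:0002326', 'GENO:0000840']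
--
--     seedset = set(seed)
--
--     def collect(es):
--         if not es:
--             return set()
--         if len(es) == 1:
--             sub, rel, obj, ref = es[0]
--             return {sub, obj} - seedset if rel in propertyList else set()
--         mid = len(es) // 2
--         return collect(es[:mid]) | collect(es[mid:])
--
--     return collect(list(edges))
-- ===== Notes on version B (the rewrite author's own statement) =====
-- stated objective: alternative
-- what changed: B replaces A's single accumulating loop with inline seed-membership branches by a divide-and-conquer recursion: the edge list is split in halves, each single matching edge yields the small set {sub,obj}-seedset, and halves are merged with set union; the dead 'rel == None' guard is dropped.
import Mathlib
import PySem

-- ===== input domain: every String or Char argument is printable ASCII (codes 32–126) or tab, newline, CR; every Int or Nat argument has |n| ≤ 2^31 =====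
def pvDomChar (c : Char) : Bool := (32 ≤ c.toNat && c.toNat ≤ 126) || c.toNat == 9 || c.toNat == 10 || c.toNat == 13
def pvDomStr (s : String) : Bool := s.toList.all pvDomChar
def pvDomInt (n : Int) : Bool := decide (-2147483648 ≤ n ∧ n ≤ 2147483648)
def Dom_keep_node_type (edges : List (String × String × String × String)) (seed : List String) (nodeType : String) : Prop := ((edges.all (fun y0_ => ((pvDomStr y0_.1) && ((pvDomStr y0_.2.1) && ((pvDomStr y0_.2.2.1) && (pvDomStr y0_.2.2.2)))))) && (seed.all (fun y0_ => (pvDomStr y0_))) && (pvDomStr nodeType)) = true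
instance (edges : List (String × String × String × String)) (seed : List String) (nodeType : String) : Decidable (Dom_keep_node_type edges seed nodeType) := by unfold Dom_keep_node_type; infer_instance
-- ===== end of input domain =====

-- B replaces A's accumulating loop (inline seed checks, incremental set.add) by a
-- divide-and-conquer recursion merging per-half sets with set union (objective: alternative).
-- Both programs return a Python set; equality of the ports' element lists is proved exactly.

-- ===== PORT A =====
-- loop body of A's for-loop; 'if rel == None: continue' is dead code for string edges (rel : String is never None) and has no Lean counterpart
def pvStepA (propertyList seed : List String) (keep : List String) (e : String × String × String × String) : List String :=
  if propertyList.contains e.2.1 then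
    let keep1 := if seed.contains e.1 then keep else PySem.Set.add keep e.1
    if seed.contains e.2.2.1 then keep1 else PySem.Set.add keep1 e.2.2.1
  else keep

def keep_node_type (edges : List (String × String × String × String)) (seed : List String) (nodeType : String) : List String :=
  let propertyList :=
    if nodeType == "pheno" then ["RO:0002200", "RO:0002607", "RO:0002326", "GENO:0000840"]
    else ["RO:HOM0000017", "RO:HOM0000020"]
  edges.foldl (pvStepA propertyList seed) PySem.Set.empty

-- ===== PORT B =====
-- Source B's inner 'collect': split at mid, recurse on both halves, union the results
def pvCollect (propertyList seedset : List String) : List (String × String × String × String) → List String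
  | [] => PySem.Set.empty
  | [e] =>
      if propertyList.contains e.2.1 then
        PySem.Set.diff (PySem.Set.ofList [e.1, e.2.2.1]) seedset
      else PySem.Set.empty
  | e1 :: e2 :: rest =>
      PySem.Set.union
        (pvCollect propertyList seedset ((e1 :: e2 :: rest).take ((e1 :: e2 :: rest).length / 2)))
        (pvCollect propertyList seedset ((e1 :: e2 :: rest).drop ((e1 :: e2 :: rest).length / 2)))
termination_by es => es.length
decreasing_by
  · simp [List.length_take]; omega
  · simp; omega

def keep_node_type_alt (edges : List (String × String × String × String)) (seed : List String) (nodeType : String) : List String :=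
  let propertyList :=
    if nodeType == "pheno" then ["RO:0002200", "RO:0002607", "RO:0002326", "GENO:0000840"]
    else ["RO:HOM0000017", "RO:HOM0000020"]
  let seedset := PySem.Set.ofList seed
  pvCollect propertyList seedset edges

-- ===== PRECONDITION & SPEC =====
def Spec_keep_node_type (edges : List (String × String × String × String)) (seed : List String) (nodeType : String) (out : List String) : Prop := out = keep_node_type_alt edges seed nodeType
instance (edges : List (String × String × String × String)) (seed : List String) (nodeType : String) (out : List String) : Decidable (Spec_keep_node_type edges seed nodeType out) := by unfold Spec_keep_node_type; infer_instance

-- ===== CLAIM (what is proved, stated in full; the proofs are below) =====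
def Claim_equal_keep_node_type : Prop := ∀ (edges : List (String × String × String × String)) (seed : List String) (nodeType : String), Dom_keep_node_type edges seed nodeType → Spec_keep_node_type edges seed nodeType (keep_node_type edges seed nodeType)

-- ===== LEMMAS AND PROOFS =====

-- one edge's contribution as a set: {sub, obj} - seedset when the relation matches, else ∅
def pvPair (propertyList seedset : List String) (e : String × String × String × String) : List String :=
  if propertyList.contains e.2.1 then
    PySem.Set.diff (PySem.Set.ofList [e.1, e.2.2.1]) seedset
  else []

lemma pvPair_nodup (propertyList seedset : List String) (e : String × String × String × String) :
    (pvPair propertyList seedset e).Nodup := by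
  unfold pvPair
  split
  · exact (PySem.Set.nodup_ofList _).filter _
  · exact List.nodup_nil

-- A's loop body is 'union with the edge's contribution'
lemma pvStepA_eq_update (propertyList seed : List String) (acc : List String)
    (e : String × String × String × String) :
    pvStepA propertyList seed acc e =
      PySem.Set.update acc (pvPair propertyList (PySem.Set.ofList seed) e) := by
  obtain ⟨s, r, o, ref⟩ := e
  unfold pvStepA pvPair
  by_cases hm : r ∈ propertyList
  · have hof : PySem.Set.ofList [s, o] = if o = s then [s] else [s, o] := by
      by_cases h : o = s <;> simp [h, PySem.Set.ofList, PySem.Set.add, PySem.Set.empty]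
    simp only [hof]
    by_cases ho : o = s
    · by_cases hs : s ∈ seed <;>
        simp [hm, hs, ho, PySem.Set.diff, PySem.Set.mem_ofList, PySem.Set.update]
    · by_cases hs : s ∈ seed <;> by_cases hoo : o ∈ seed <;>
        simp [hm, hs, hoo, ho, PySem.Set.diff, PySem.Set.mem_ofList, PySem.Set.update]
  · simp [hm, PySem.Set.update]

lemma update_add (a b : List String) (x : String) :
    PySem.Set.update a (PySem.Set.add b x) = PySem.Set.add (PySem.Set.update a b) x := by
  by_cases hx : x ∈ b
  · rw [PySem.Set.add_of_mem hx, PySem.Set.add_of_mem (by simp [PySem.Set.mem_update, hx])]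
  · rw [PySem.Set.add_of_not_mem hx, PySem.Set.update_append]
    rfl

lemma update_assoc (a b c : List String) :
    PySem.Set.update (PySem.Set.update a b) c = PySem.Set.update a (PySem.Set.update b c) := by
  induction c generalizing b with
  | nil => simp [PySem.Set.update]
  | cons x c ih =>
      rw [PySem.Set.update_cons, PySem.Set.update_cons, ← update_add, ih]

-- shifting the accumulator out of A's fold
lemma foldA_shift (propertyList seed : List String)
    (es : List (String × String × String × String)) (acc : List String) :
    es.foldl (pvStepA propertyList seed) acc =
      PySem.Set.update acc (es.foldl (pvStepA propertyList seed) []) := by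
  induction es generalizing acc with
  | nil => simp [PySem.Set.update]
  | cons e es ih =>
      rw [List.foldl_cons, List.foldl_cons, ih (pvStepA propertyList seed acc e),
        ih (pvStepA propertyList seed [] e), pvStepA_eq_update, pvStepA_eq_update,
        ← update_assoc]
      congr 1
      have : PySem.Set.update ([] : List String) (pvPair propertyList (PySem.Set.ofList seed) e)
          = pvPair propertyList (PySem.Set.ofList seed) e := by
        rw [PySem.Set.update_nil_left, PySem.Set.ofList_eq_self_of_nodup _ (pvPair_nodup _ _ _)]
      rw [this]

-- B's divide-and-conquer equals A's fold (strong induction on the list length)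
lemma pvCollect_eq_foldA_aux (propertyList seed : List String) (n : Nat) :
    ∀ (es : List (String × String × String × String)), es.length ≤ n →
      pvCollect propertyList (PySem.Set.ofList seed) es =
        es.foldl (pvStepA propertyList seed) [] := by
  induction n with
  | zero =>
      intro es h
      have : es = [] := List.eq_nil_of_length_eq_zero (Nat.le_zero.mp h)
      subst this
      simp [pvCollect, PySem.Set.empty]
  | succ n ih =>
      intro es hlen
      rcases es with _ | ⟨e, _ | ⟨e2, rest⟩⟩
      · simp [pvCollect, PySem.Set.empty]
      · have hR : List.foldl (pvStepA propertyList seed) [] [e]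
            = pvPair propertyList (PySem.Set.ofList seed) e := by
          rw [List.foldl_cons, List.foldl_nil, pvStepA_eq_update, PySem.Set.update_nil_left,
            PySem.Set.ofList_eq_self_of_nodup _ (pvPair_nodup _ _ _)]
        rw [pvCollect, hR]
        rfl
      · have h1 : (List.take ((e :: e2 :: rest).length / 2) (e :: e2 :: rest)).length ≤ n := by
          simp at hlen ⊢; omega
        have h2 : (List.drop ((e :: e2 :: rest).length / 2) (e :: e2 :: rest)).length ≤ n := by
          simp at hlen ⊢; omega
        rw [pvCollect, ih _ h1, ih _ h2]
        conv_rhs => rw [← List.take_append_drop ((e :: e2 :: rest).length / 2) (e :: e2 :: rest)]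
        rw [List.foldl_append,
          foldA_shift propertyList seed (List.drop ((e :: e2 :: rest).length / 2) (e :: e2 :: rest))
            (List.foldl (pvStepA propertyList seed) []
              (List.take ((e :: e2 :: rest).length / 2) (e :: e2 :: rest)))]
        rfl

lemma pvCollect_eq_foldA (propertyList seed : List String)
    (es : List (String × String × String × String)) :
    pvCollect propertyList (PySem.Set.ofList seed) es =
      es.foldl (pvStepA propertyList seed) [] :=
  pvCollect_eq_foldA_aux propertyList seed es.length es (Nat.le_refl _)

-- ===== VERDICT (by name: the statement is the Claim_ definition above) =====
theorem keep_node_type_spec : Claim_equal_keep_node_type := by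
  intro edges seed nodeType _
  show keep_node_type edges seed nodeType = keep_node_type_alt edges seed nodeType
  unfold keep_node_type keep_node_type_alt
  exact (pvCollect_eq_foldA _ seed edges).symm
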